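-- pv_equiv track=rewrite | github.com/Regus-1411/STEGO-FINAL | main.py | _derive_technique
-- ===== SOURCE A (Python) =====
-- def _derive_technique(top_features):
--     if not top_features:
--         return "Unknown"
--     names = " ".join(f["feature"].lower() for f in top_features)
--     if "lsb" in names:
--         return "LSB Substitution"
--     if "freq" in names or "spectral" in names or "dct" in names:
--         return "DCT / Frequency Domain"
--     if "residual" in names:
--         return "Noise Residual Hiding"
--     if "glcm" in names:
--         return "Texture-Based Hiding"
--     if "diff" in names:
--         return "Pixel Difference Encoding"
--     return "Statistical Anomaly"
-- ===== SOURCE B (Python) =====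
-- KEYWORDS = [("lsb", 0), ("freq", 1), ("spectral", 1), ("dct", 1),
--             ("residual", 2), ("glcm", 3), ("diff", 4)]
-- OUTCOMES = ["LSB Substitution", "DCT / Frequency Domain", "Noise Residual Hiding",
--             "Texture-Based Hiding", "Pixel Difference Encoding", "Statistical Anomaly"]
--
-- def _derive_technique(top_features):
--     if not top_features:
--         return "Unknown"
--     best = 5
--     for f in top_features:
--         nm = f["feature"].lower()
--         for kw, idx in KEYWORDS:
--             if idx < best and kw in nm:
--                 best = idx
--     return OUTCOMES[best]
-- ===== Notes on version B (the rewrite author's own statement) =====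
-- stated objective: alternative
-- what changed: B makes one feature-major pass maintaining the minimal matching rule index in a numeric accumulator and indexes an outcome table with it, instead of A's keyword-major if-chain that rescans a joined string of all names once per keyword; the join and the early-return chain disappear.
import Mathlib
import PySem

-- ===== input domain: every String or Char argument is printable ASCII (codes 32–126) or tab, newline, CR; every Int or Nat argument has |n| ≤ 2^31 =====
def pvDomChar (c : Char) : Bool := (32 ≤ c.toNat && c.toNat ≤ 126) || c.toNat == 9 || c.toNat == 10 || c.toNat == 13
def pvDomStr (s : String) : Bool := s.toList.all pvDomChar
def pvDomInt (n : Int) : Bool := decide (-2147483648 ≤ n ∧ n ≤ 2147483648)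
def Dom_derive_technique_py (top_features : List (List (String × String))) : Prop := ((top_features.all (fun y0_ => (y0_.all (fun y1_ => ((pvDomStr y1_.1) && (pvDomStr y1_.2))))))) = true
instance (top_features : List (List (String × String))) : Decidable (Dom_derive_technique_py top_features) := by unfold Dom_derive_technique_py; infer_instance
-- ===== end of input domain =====

-- B replaces A's keyword-major if-chain over a joined string by one feature-major pass
-- keeping the minimal matching rule index, then indexes an outcome table (alternative; same cost).

-- ===== PORT A =====
-- f["feature"] is Dict lookup; Pre_ below guarantees the key is present (KeyError excluded),
-- so getD with an unused default "" is exact there.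
def derive_technique_py (top_features : List (List (String × String))) : String :=
  if top_features = [] then "Unknown"
  else
    let names := PySem.Str.join " "
      (top_features.map (fun f => PySem.Str.lower ((PySem.Dict.mk f).getD "feature" "")))
    if PySem.Str.isIn "lsb" names then "LSB Substitution"
    else if PySem.Str.isIn "freq" names || PySem.Str.isIn "spectral" names || PySem.Str.isIn "dct" names then
      "DCT / Frequency Domain"
    else if PySem.Str.isIn "residual" names then "Noise Residual Hiding"
    else if PySem.Str.isIn "glcm" names then "Texture-Based Hiding"
    else if PySem.Str.isIn "diff" names then "Pixel Difference Encoding"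
    else "Statistical Anomaly"

-- ===== PORT B =====
def pvKeywords : List (String × Nat) :=
  [("lsb", 0), ("freq", 1), ("spectral", 1), ("dct", 1),
   ("residual", 2), ("glcm", 3), ("diff", 4)]

def pvOutcomes : List String :=
  ["LSB Substitution", "DCT / Frequency Domain", "Noise Residual Hiding",
   "Texture-Based Hiding", "Pixel Difference Encoding", "Statistical Anomaly"]

-- the nested 'for' loops become nested foldl over the same Nat accumulator 'best';
-- best ∈ [0,5] always, so the OUTCOMES[best] index is in range and getD's default is unreachable
def derive_technique_py_alt (top_features : List (List (String × String))) : String :=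
  if top_features = [] then "Unknown"
  else
    let best := top_features.foldl (fun b f =>
      let nm := PySem.Str.lower ((PySem.Dict.mk f).getD "feature" "")
      pvKeywords.foldl (fun b p => if p.2 < b && PySem.Str.isIn p.1 nm then p.2 else b) b) 5
    pvOutcomes.getD best ""

-- ===== PRECONDITION & SPEC =====
-- Pre_ excludes exactly the inputs where some feature dict lacks the key "feature": there Python's
-- f["feature"] raises KeyError (both in A and in B).
def Pre_derive_technique_py (top_features : List (List (String × String))) : Prop :=
  ∀ f ∈ top_features, (PySem.Dict.mk f).contains "feature" = true
instance (top_features : List (List (String × String))) : Decidable (Pre_derive_technique_py top_features) := by unfold Pre_derive_technique_py; infer_instance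

def pvWitness_derive_technique_py : (List (List (String × String))) :=
  [[("feature", "LSB_ratio")], [("feature", "glcm_contrast")]]

def Spec_derive_technique_py (top_features : List (List (String × String))) (out : String) : Prop := out = derive_technique_py_alt top_features
instance (top_features : List (List (String × String))) (out : String) : Decidable (Spec_derive_technique_py top_features out) := by unfold Spec_derive_technique_py; infer_instance

-- ===== CLAIM (what is proved, stated in full; the proofs are below) =====
def Claim_equal_derive_technique_py : Prop := ∀ (top_features : List (List (String × String))), Dom_derive_technique_py top_features → Pre_derive_technique_py top_features → Spec_derive_technique_py top_features (derive_technique_py top_features)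

-- ===== LEMMAS AND PROOFS =====

-- a keyword not containing c that is a prefix of a ++ c :: b is a prefix of a
lemma prefix_append_cons {α : Type} (kw a b : List α) (c : α) (hc : c ∉ kw)
    (h : kw <+: a ++ c :: b) : kw <+: a := by
  induction a generalizing kw with
  | nil =>
    cases kw with
    | nil => exact List.nil_prefix
    | cons x t =>
      rcases List.cons_prefix_cons.mp h with ⟨rfl, -⟩
      exact absurd (List.mem_cons_self) hc
  | cons y a' ih =>
    cases kw with
    | nil => exact List.nil_prefix
    | cons x t =>
      rcases List.cons_prefix_cons.mp h with ⟨rfl, ht⟩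
      exact List.cons_prefix_cons.mpr ⟨rfl, ih t (fun hm => hc (List.mem_cons_of_mem _ hm)) ht⟩

-- a nonempty keyword not containing c is an infix of a ++ c :: b iff it is an infix of a or of b
lemma infix_append_cons {α : Type} (kw a b : List α) (c : α) (h1 : kw ≠ []) (hc : c ∉ kw) :
    kw <:+: a ++ c :: b ↔ kw <:+: a ∨ kw <:+: b := by
  constructor
  · intro h
    induction a with
    | nil =>
      rcases List.infix_cons_iff.mp h with hp | hi
      · cases kw with
        | nil => exact absurd rfl h1
        | cons x t =>
          rcases List.cons_prefix_cons.mp hp with ⟨rfl, -⟩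
          exact absurd (List.mem_cons_self) hc
      · exact Or.inr hi
    | cons y a' ih =>
      rcases List.infix_cons_iff.mp h with hp | hi
      · exact Or.inl (List.IsPrefix.isInfix (prefix_append_cons kw (y :: a') b c hc hp))
      · rcases ih hi with h' | h'
        · exact Or.inl (h'.trans (List.suffix_cons y a').isInfix)
        · exact Or.inr h'
  · rintro (h | h)
    · exact h.trans ⟨[], c :: b, by simp⟩
    · exact h.trans ⟨a ++ [c], [], by simp⟩

-- a nonempty space-free keyword is an infix of " ".join(parts) iff it is an infix of some part
lemma infix_join_space (kw : List Char) (parts : List (List Char))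
    (h1 : kw ≠ []) (h2 : ' ' ∉ kw) :
    kw <:+: PySem.Chars.join [' '] parts ↔ ∃ p ∈ parts, kw <:+: p := by
  induction parts with
  | nil =>
    simp [PySem.Chars.join_nil, List.infix_nil, h1]
  | cons p ps ih =>
    cases ps with
    | nil => simp [PySem.Chars.join_singleton]
    | cons q t =>
      rw [PySem.Chars.join_cons_cons, List.append_assoc]
      have : ([' '] : List Char) ++ PySem.Chars.join [' '] (q :: t)
           = ' ' :: PySem.Chars.join [' '] (q :: t) := rfl
      rw [this, infix_append_cons kw p _ ' ' h1 h2, ih]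
      simp

-- scanning the joined string for a nonempty space-free keyword equals scanning each name
lemma isIn_join_eq_any (kw : String) (names : List String)
    (h1 : kw.toList ≠ []) (h2 : ' ' ∉ kw.toList) :
    PySem.Str.isIn kw (PySem.Str.join " " names)
      = names.any (fun nm => PySem.Str.isIn kw nm) := by
  rw [Bool.eq_iff_iff, PySem.Str.isIn_iff_infix, PySem.Str.toList_join, List.any_eq_true]
  have : (" ".toList : List Char) = [' '] := rfl
  rw [this, infix_join_space kw.toList _ h1 h2]
  constructor
  · rintro ⟨p, hp, hinf⟩
    rcases List.mem_map.mp hp with ⟨nm, hnm, rfl⟩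
    exact ⟨nm, hnm, (PySem.Str.isIn_iff_infix kw nm).mpr hinf⟩
  · rintro ⟨nm, hnm, h⟩
    exact ⟨nm.toList, List.mem_map_of_mem hnm, (PySem.Str.isIn_iff_infix kw nm).mp h⟩

-- B's guarded inner loop over the keyword table is a min-fold over the matched indices
lemma inner_fold_eq_min_fold (K : List (String × Nat)) (nm : String) (b : Nat) :
    K.foldl (fun b p => if p.2 < b && PySem.Str.isIn p.1 nm then p.2 else b) b
      = (K.filterMap (fun p => if PySem.Str.isIn p.1 nm then some p.2 else none)).foldl min b := by
  induction K generalizing b with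
  | nil => rfl
  | cons p K ih =>
    cases hI : PySem.Str.isIn p.1 nm with
    | true =>
      have hmin : (if decide (p.2 < b) = true then p.2 else b) = min b p.2 := by
        split_ifs with h' <;> simp at h' <;> omega
      simp only [List.foldl_cons, List.filterMap_cons, hI, Bool.and_true, if_true, hmin, ih]
    | false =>
      simp only [List.foldl_cons, List.filterMap_cons, hI, Bool.and_false, Bool.false_eq_true,
        if_false, ih]

-- folding the per-name min-folds is the min-fold over the concatenation
lemma outer_fold_eq_flat (l : List String) (M : String → List Nat) (b : Nat) :
    l.foldl (fun b nm => (M nm).foldl min b) b = (l.flatMap M).foldl min b := by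
  induction l generalizing b with
  | nil => rfl
  | cons nm l ih => simp only [List.foldl_cons, List.flatMap_cons, List.foldl_append, ih]

lemma foldl_min_le_init (l : List Nat) (b : Nat) : l.foldl min b ≤ b := by
  induction l generalizing b with
  | nil => exact le_refl b
  | cons x l ih => exact le_trans (ih (min b x)) (Nat.min_le_left b x)

lemma foldl_min_le_mem (l : List Nat) (b x : Nat) (h : x ∈ l) : l.foldl min b ≤ x := by
  induction l generalizing b with
  | nil => cases h
  | cons a l ih =>
    rcases List.mem_cons.mp h with rfl | h'
    · exact le_trans (foldl_min_le_init l (min b x)) (Nat.min_le_right b x)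
    · exact ih (min b a) h'

lemma foldl_min_mem_or (l : List Nat) (b : Nat) : l.foldl min b = b ∨ l.foldl min b ∈ l := by
  induction l generalizing b with
  | nil => exact Or.inl rfl
  | cons a l ih =>
    rcases ih (min b a) with h | h
    · rw [List.foldl_cons, h]
      rcases Nat.le_total b a with h' | h'
      · exact Or.inl (Nat.min_eq_left h')
      · exact Or.inr (by rw [Nat.min_eq_right h']; exact List.mem_cons_self)
    · exact Or.inr (List.mem_cons_of_mem a h)

-- min-folds only depend on the SET of elements: key to swapping loop order
lemma foldl_min_eq_of_iff (l1 l2 : List Nat) (h : ∀ x, x ∈ l1 ↔ x ∈ l2) (b : Nat) :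
    l1.foldl min b = l2.foldl min b := by
  apply le_antisymm
  · rcases foldl_min_mem_or l2 b with h2 | h2
    · rw [h2]; exact foldl_min_le_init l1 b
    · exact foldl_min_le_mem l1 b _ ((h _).mpr h2)
  · rcases foldl_min_mem_or l1 b with h1 | h1
    · rw [h1]; exact foldl_min_le_init l2 b
    · exact foldl_min_le_mem l2 b _ ((h _).mp h1)

-- feature-major matched indices = keyword-major matched indices, as sets
lemma flat_mem_iff (K : List (String × Nat)) (names : List String) (x : Nat) :
    (x ∈ names.flatMap (fun nm =>
        K.filterMap (fun p => if PySem.Str.isIn p.1 nm then some p.2 else none)))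
    ↔ (x ∈ K.filterMap (fun p =>
        if names.any (fun nm => PySem.Str.isIn p.1 nm) then some p.2 else none)) := by
  simp only [List.mem_flatMap, List.mem_filterMap, List.any_eq_true,
    Option.ite_none_right_eq_some, Option.some.injEq]
  constructor
  · rintro ⟨nm, hnm, p, hp, hi, he⟩
    exact ⟨p, hp, ⟨nm, hnm, hi⟩, he⟩
  · rintro ⟨p, hp, ⟨nm, hnm, hi⟩, he⟩
    exact ⟨nm, hnm, p, hp, hi, he⟩


-- the remaining goal depends only on the seven per-keyword booleans: settle all 128 cases at once
lemma final_bools (a f s d r g di : Bool) :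
    (if a = true then "LSB Substitution"
     else if (f || s || d) = true then "DCT / Frequency Domain"
     else if r = true then "Noise Residual Hiding"
     else if g = true then "Texture-Based Hiding"
     else if di = true then "Pixel Difference Encoding"
     else "Statistical Anomaly")
    = pvOutcomes.getD ((List.filterMap (fun q : Bool × Nat => if q.1 then some q.2 else none)
        [(a, 0), (f, 1), (s, 1), (d, 1), (r, 2), (g, 3), (di, 4)]).foldl min 5) "" := by
  revert a f s d r g di
  decide

-- ===== VERDICT (by name: the statement is the Claim_ definition above) =====
theorem derive_technique_py_spec : Claim_equal_derive_technique_py := by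
  intro tf _ _
  unfold Spec_derive_technique_py derive_technique_py derive_technique_py_alt
  by_cases htf : tf = []
  · simp [htf]
  · simp only [htf, if_false]
    set names := tf.map (fun f => PySem.Str.lower ((PySem.Dict.mk f).getD "feature" "")) with hnames
    -- A: joined-string scan = per-name any
    have e : ∀ kw : String, kw.toList ≠ [] → ' ' ∉ kw.toList →
        PySem.Str.isIn kw (PySem.Str.join " " names) = names.any (fun nm => PySem.Str.isIn kw nm) :=
      fun kw a b => isIn_join_eq_any kw names a b
    rw [e "lsb" (by decide) (by decide), e "freq" (by decide) (by decide),
        e "spectral" (by decide) (by decide), e "dct" (by decide) (by decide),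
        e "residual" (by decide) (by decide), e "glcm" (by decide) (by decide),
        e "diff" (by decide) (by decide)]
    -- B: best = min-fold over keyword-major matched indices
    have hb : tf.foldl (fun b f =>
        let nm := PySem.Str.lower ((PySem.Dict.mk f).getD "feature" "")
        pvKeywords.foldl (fun b p => if p.2 < b && PySem.Str.isIn p.1 nm then p.2 else b) b) 5
      = (pvKeywords.filterMap (fun p =>
          if names.any (fun nm => PySem.Str.isIn p.1 nm) then some p.2 else none)).foldl min 5 := by
      rw [hnames, ← List.foldl_map
        (f := fun f => PySem.Str.lower ((PySem.Dict.mk f).getD "feature" ""))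
        (g := fun b nm => pvKeywords.foldl (fun b p => if p.2 < b && PySem.Str.isIn p.1 nm then p.2 else b) b)]
      simp only [inner_fold_eq_min_fold]
      rw [outer_fold_eq_flat, foldl_min_eq_of_iff _ _ (flat_mem_iff pvKeywords _)]
    rw [hb]
    -- both sides are now functions of the seven per-keyword booleans
    have hbr : pvKeywords.filterMap (fun p =>
          if names.any (fun nm => PySem.Str.isIn p.1 nm) then some p.2 else none)
        = List.filterMap (fun q : Bool × Nat => if q.1 then some q.2 else none)
            [(names.any (fun nm => PySem.Str.isIn "lsb" nm), 0),
             (names.any (fun nm => PySem.Str.isIn "freq" nm), 1),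
             (names.any (fun nm => PySem.Str.isIn "spectral" nm), 1),
             (names.any (fun nm => PySem.Str.isIn "dct" nm), 1),
             (names.any (fun nm => PySem.Str.isIn "residual" nm), 2),
             (names.any (fun nm => PySem.Str.isIn "glcm" nm), 3),
             (names.any (fun nm => PySem.Str.isIn "diff" nm), 4)] := rfl
    rw [hbr]
    exact final_bools (names.any (fun nm => PySem.Str.isIn "lsb" nm))
      (names.any (fun nm => PySem.Str.isIn "freq" nm))
      (names.any (fun nm => PySem.Str.isIn "spectral" nm))
      (names.any (fun nm => PySem.Str.isIn "dct" nm))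
      (names.any (fun nm => PySem.Str.isIn "residual" nm))
      (names.any (fun nm => PySem.Str.isIn "glcm" nm))
      (names.any (fun nm => PySem.Str.isIn "diff" nm))
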